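-- pv_equiv track=rewrite | github.com/smayya337/libcodebusters | libcodebusters/Utils.py | vigKeyArr
-- ===== SOURCE A (Python) =====
-- def isLetter(i: int) -> bool:
--     return 65 <= i <= 90
--
-- def vigKeyArr(text: str, arr: list) -> list:
--     keyIndex: int = 0
--     keyChar: list = []
--     for i in range(0, len(arr)):
--         if isLetter(arr[i]):
--             keyChar.append(ord(text[keyIndex]))
--             keyIndex += 1
--             if keyIndex == len(text):
--                 keyIndex = 0
--         else:
--             keyChar.append(0)
--     return keyChar
-- ===== SOURCE B (Python) =====
-- def vigKeyArr(text: str, arr: list) -> list: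
--     n = len(text)
--     counts = []  # number of letter codes strictly before each position
--     c = 0
--     for v in arr:
--         counts.append(c)
--         if 65 <= v <= 90:
--             c += 1
--     return [ord(text[counts[i] % n]) if 65 <= arr[i] <= 90 else 0
--             for i in range(len(arr))]
-- ===== Notes on version B (the rewrite author's own statement) =====
-- stated objective: alternative
-- what changed: Replaces the single stateful scan with explicit key-index reset by a two-pass scheme: a first pass records the prefix count of letters at each position, then a comprehension maps each letter position to ord(text[count % len(text)]) by modular arithmetic instead of carrying and resetting a key index.
import Mathlib
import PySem

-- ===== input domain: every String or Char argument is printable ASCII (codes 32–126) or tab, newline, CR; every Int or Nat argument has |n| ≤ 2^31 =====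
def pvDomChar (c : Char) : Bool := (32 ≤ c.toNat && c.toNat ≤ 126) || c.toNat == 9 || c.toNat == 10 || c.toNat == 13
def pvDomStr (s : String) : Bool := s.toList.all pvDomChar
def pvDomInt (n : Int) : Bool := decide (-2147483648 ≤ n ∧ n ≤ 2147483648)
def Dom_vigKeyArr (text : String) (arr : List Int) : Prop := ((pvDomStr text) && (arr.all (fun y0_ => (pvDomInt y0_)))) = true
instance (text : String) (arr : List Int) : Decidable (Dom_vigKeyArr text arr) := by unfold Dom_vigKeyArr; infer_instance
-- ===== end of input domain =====

-- B replaces A's stateful scan (key index with explicit reset) by a prefix-count pass plus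
-- a modular-indexing comprehension; objective: alternative decomposition, same cost.

-- ===== PORT A =====
-- the loop over arr carrying keyIndex; text[keyIndex] is in range whenever Pre_ holds
def vigALoop (t : List Char) : List Int → Nat → List Int
  | [], _ => []
  | v :: rest, k =>
    if 65 ≤ v ∧ v ≤ 90 then
      ((t.getD k ' ').toNat : Int) ::
        vigALoop t rest (if k + 1 = t.length then 0 else k + 1)
    else
      (0 : Int) :: vigALoop t rest k

def vigKeyArr (text : String) (arr : List Int) : List Int :=
  vigALoop text.toList arr 0

-- ===== PORT B =====
-- first pass: number of letter codes strictly before each position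
def countsFrom (c : Nat) : List Int → List Nat
  | [] => []
  | v :: rest => c :: countsFrom (if 65 ≤ v ∧ v ≤ 90 then c + 1 else c) rest

def vigKeyArr_alt (text : String) (arr : List Int) : List Int :=
  let t := text.toList
  (arr.zip (countsFrom 0 arr)).map (fun p =>
    if 65 ≤ p.1 ∧ p.1 ≤ 90 then ((t.getD (p.2 % t.length) ' ').toNat : Int) else 0)

-- ===== PRECONDITION & SPEC =====
-- Pre_ excludes exactly the inputs where A raises IndexError: empty text together with a letter code in arr
def Pre_vigKeyArr (text : String) (arr : List Int) : Prop :=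
  text = "" → ∀ v ∈ arr, ¬ (65 ≤ v ∧ v ≤ 90)
instance (text : String) (arr : List Int) : Decidable (Pre_vigKeyArr text arr) := by
  unfold Pre_vigKeyArr; infer_instance

def pvWitness_vigKeyArr : String × List Int := ("KEY", [72, 32, 69, 76, 80])

def Spec_vigKeyArr (text : String) (arr : List Int) (out : List Int) : Prop := out = vigKeyArr_alt text arr
instance (text : String) (arr : List Int) (out : List Int) : Decidable (Spec_vigKeyArr text arr out) := by unfold Spec_vigKeyArr; infer_instance

-- ===== CLAIM (what is proved, stated in full; the proofs are below) =====
def Claim_equal_vigKeyArr : Prop := ∀ (text : String) (arr : List Int), Dom_vigKeyArr text arr → Pre_vigKeyArr text arr → Spec_vigKeyArr text arr (vigKeyArr text arr)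

-- ===== LEMMAS AND PROOFS =====

-- nonempty text: A's key index k = c % |t| tracks B's running letter count c
theorem vigALoop_eq_counts (t : List Char) (ht : t ≠ []) :
    ∀ (arr : List Int) (c : Nat),
      vigALoop t arr (c % t.length) =
        (arr.zip (countsFrom c arr)).map (fun p =>
          if 65 ≤ p.1 ∧ p.1 ≤ 90 then ((t.getD (p.2 % t.length) ' ').toNat : Int) else 0) := by
  have hn : 0 < t.length := List.length_pos_iff.mpr ht
  intro arr
  induction arr with
  | nil => intro c; simp [vigALoop, countsFrom]
  | cons v rest ih =>
    intro c
    by_cases hv : 65 ≤ v ∧ v ≤ 90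
    · have h1 : c % t.length < t.length := Nat.mod_lt _ hn
      have hc : c % t.length + 1 + t.length * (c / t.length) = c + 1 := by
        have := Nat.mod_add_div c t.length; omega
      have hmod : (c + 1) % t.length = (c % t.length + 1) % t.length := by
        rw [← hc, Nat.add_mul_mod_self_left]
      have hk : (if c % t.length + 1 = t.length then 0 else c % t.length + 1) = (c + 1) % t.length := by
        by_cases he : c % t.length + 1 = t.length
        · rw [if_pos he, hmod, he, Nat.mod_self]
        · rw [if_neg he, hmod]; exact (Nat.mod_eq_of_lt (by omega)).symm
      simp only [vigALoop, countsFrom, List.zip_cons_cons, List.map_cons, if_pos hv]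
      rw [hk, ih (c + 1)]
    · simp only [vigALoop, countsFrom, List.zip_cons_cons, List.map_cons, if_neg hv]
      rw [ih c]

-- no letters: both sides are a list of zeros, any key index / count
theorem vigALoop_eq_counts_noletter (t : List Char) :
    ∀ (arr : List Int), (∀ v ∈ arr, ¬ (65 ≤ v ∧ v ≤ 90)) → ∀ (k c : Nat),
      vigALoop t arr k =
        (arr.zip (countsFrom c arr)).map (fun p =>
          if 65 ≤ p.1 ∧ p.1 ≤ 90 then ((t.getD (p.2 % t.length) ' ').toNat : Int) else 0) := by
  intro arr
  induction arr with
  | nil => intro _ k c; simp [vigALoop, countsFrom]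
  | cons v rest ih =>
    intro h k c
    have hv : ¬ (65 ≤ v ∧ v ≤ 90) := h v (List.mem_cons_self)
    simp only [vigALoop, countsFrom, if_neg hv, List.zip_cons_cons, List.map_cons]
    rw [ih (fun w hw => h w (List.mem_cons_of_mem _ hw)) k c]

-- ===== VERDICT (by name: the statement is the Claim_ definition above) =====
theorem vigKeyArr_spec : Claim_equal_vigKeyArr := by
  intro text arr _ hpre
  unfold Spec_vigKeyArr vigKeyArr vigKeyArr_alt
  by_cases ht : text = ""
  · exact vigALoop_eq_counts_noletter text.toList arr (hpre ht) 0 0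
  · have ht' : text.toList ≠ [] := fun h => ht (String.toList_eq_nil_iff.mp h)
    have := vigALoop_eq_counts text.toList ht' arr 0
    simpa using this
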